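-- pv_equiv track=rewrite | github.com/eldorbekpulatov/CS-1110-Intro-to-Pyhton | Labs/lab12/lab12.py | num_space_runs
-- ===== SOURCE A (Python) =====
-- def num_space_runs(s):
--     """Returns: The number of runs of spaces in the string s.
--
--     A run is a collection of adjacent spaces.  We need a non-space character
--     in-between to break up runs.
--
--     Example: num_space_runs('  a  f   g    ') returns 4
--              num_space_runs('a  f   g') returns 2
--              num_space_runs('  a  bc   d') returns 3
--
--     Parameter s: The string to parse
--     Precondition: s is a nonempty string with letters and spaces"""
--     # PUT THE INITIALIZATION CODE HERE
--     n=0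
--     i=0
--
--     if s[0]==" ":
--         n+=1
--     # invariant: s[0..i] contains n runs of spaces
--     # PUT THE WHILE LOOP HERE
--     while i<=len(s)-2:
--         if s[i]!=" " and s[i+1]==" ":
--             n+=1
--         i+=1
--     # post: s[0..len(s)-1] contains n runs of spaces
--     # PUT THE RETURN STATEMENT HERE
--     return n
-- ===== SOURCE B (Python) =====
-- def num_space_runs(s):
--     # Arithmetic identity: a run of k spaces contains k spaces and k-1
--     # adjacent space-pairs, so (#spaces) - (#adjacent space pairs) = #runs.
--     spaces = sum(c == ' ' for c in s)
--     pairs = sum(a == ' ' and b == ' ' for a, b in zip(s, s[1:]))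
--     return spaces - pairs
-- ===== Notes on version B (the rewrite author's own statement) =====
-- stated objective: alternative
-- what changed: Replaces A's run-start detection scan (leading-space special case plus non-space-to-space transition counting in an index while loop) by the arithmetic identity runs = #spaces - #adjacent space pairs, computed as two comprehension sums over the characters and a zip of the string with its shift.
-- outside the precondition, e.g. on num_space_runs(''): A raises IndexError, B returns 0
import Mathlib
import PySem

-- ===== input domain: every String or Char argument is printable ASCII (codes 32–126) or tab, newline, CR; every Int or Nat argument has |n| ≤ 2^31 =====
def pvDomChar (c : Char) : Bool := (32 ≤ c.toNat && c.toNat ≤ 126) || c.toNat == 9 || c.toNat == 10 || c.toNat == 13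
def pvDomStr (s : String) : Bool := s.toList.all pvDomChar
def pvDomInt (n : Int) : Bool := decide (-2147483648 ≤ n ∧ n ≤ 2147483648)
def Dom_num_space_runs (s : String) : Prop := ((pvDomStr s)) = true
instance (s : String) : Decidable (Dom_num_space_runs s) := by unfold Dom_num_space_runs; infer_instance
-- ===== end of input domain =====

-- B replaces A's run-start detection scan by the arithmetic identity
-- runs = #spaces - #adjacent space pairs (two comprehension sums); same O(n) cost.
-- Pre_ excludes only the empty string, on which A raises IndexError at s[0].


-- ===== PORT A =====
-- Literal port of A: n starts at 1 iff s[0] == ' ' (s[0] via pyGet?; on the empty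
-- string Python raises IndexError, excluded by Pre_), then the while loop
-- 'while i <= len(s)-2' counts indices i with s[i] != ' ' and s[i+1] == ' '.
-- Inside the loop both indices are always in range, so getD's default is never used.
def num_space_runs (s : String) : Int :=
  let cs := s.toList
  let n0 : Int := if PySem.Str.pyGet? s 0 = some ' ' then 1 else 0
  (List.range (cs.length - 1)).foldl
    (fun n i => if cs.getD i ' ' ≠ ' ' ∧ cs.getD (i + 1) ' ' = ' ' then n + 1 else n) n0

-- ===== PORT B =====
-- Port of B: spaces = sum(c == ' ' for c in s);
-- pairs = sum(a == ' ' and b == ' ' for a, b in zip(s, s[1:])); return spaces - pairs.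
def num_space_runs_alt (s : String) : Int :=
  ((s.toList.map (fun c => if c = ' ' then (1 : Int) else 0)).sum)
    - (((s.toList.zip (PySem.List.slice s.toList (some 1) none)).map
        (fun p => if p.1 = ' ' ∧ p.2 = ' ' then (1 : Int) else 0)).sum)

-- ===== PRECONDITION & SPEC =====
-- Pre_ excludes only the empty string, on which A raises IndexError at s[0] (B returns 0 there).
def Pre_num_space_runs (s : String) : Prop := s ≠ ""
instance (s : String) : Decidable (Pre_num_space_runs s) := by unfold Pre_num_space_runs; infer_instance
def pvWitness_num_space_runs : String := "  a  f   g    "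

def Spec_num_space_runs (s : String) (out : Int) : Prop := out = num_space_runs_alt s
instance (s : String) (out : Int) : Decidable (Spec_num_space_runs s out) := by unfold Spec_num_space_runs; infer_instance

-- ===== CLAIM (what is proved, stated in full; the proofs are below) =====
def Claim_equal_num_space_runs : Prop := ∀ (s : String), Dom_num_space_runs s → Pre_num_space_runs s → Spec_num_space_runs s (num_space_runs s)

-- ===== LEMMAS AND PROOFS =====

-- number of non-space→space transitions (run starts at positions ≥ 1)
def srPairs : List Char → Int
  | a :: b :: t => (if a ≠ ' ' ∧ b = ' ' then 1 else 0) + srPairs (b :: t)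
  | _ => 0

-- A's while loop, with general accumulator, computes srPairs.
theorem foldRange_eq_pairs : ∀ (cs : List Char) (a : Int),
    (List.range (cs.length - 1)).foldl
      (fun n i => if cs.getD i ' ' ≠ ' ' ∧ cs.getD (i + 1) ' ' = ' ' then n + 1 else n) a
    = a + srPairs cs := by
  intro cs
  induction cs with
  | nil => intro a; simp [srPairs]
  | cons c t ih =>
    intro a
    cases t with
    | nil => simp [srPairs]
    | cons d t' =>
      have hlen : (c :: d :: t').length - 1 = t'.length + 1 := by simp
      rw [hlen, List.range_succ_eq_map, List.foldl_cons, List.foldl_map]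
      have hfun : (fun (n : Int) (i : Nat) =>
          if (c :: d :: t').getD (i + 1) ' ' ≠ ' ' ∧ (c :: d :: t').getD (i + 1 + 1) ' ' = ' '
          then n + 1 else n)
          = (fun (n : Int) (i : Nat) =>
          if (d :: t').getD i ' ' ≠ ' ' ∧ (d :: t').getD (i + 1) ' ' = ' ' then n + 1 else n) := by
        funext n i
        simp
      have hlen2 : (d :: t').length - 1 = t'.length := by simp
      rw [hfun]
      have := ih (if (c :: d :: t').getD 0 ' ' ≠ ' ' ∧ (c :: d :: t').getD (0 + 1) ' ' = ' '
          then a + 1 else a)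
      rw [hlen2] at this
      rw [this]
      simp only [srPairs, List.getD_cons_zero, List.getD_cons_succ]
      split_ifs <;> ring

-- B's two sums in terms of srPairs: #spaces − #adjacent pairs
-- = (1 if the head is a space) + #(non-space→space transitions).
theorem sums_eq_pairs : ∀ (cs : List Char),
    ((cs.map (fun c => if c = ' ' then (1 : Int) else 0)).sum)
      - (((cs.zip cs.tail).map
          (fun p => if p.1 = ' ' ∧ p.2 = ' ' then (1 : Int) else 0)).sum)
    = (if cs.head? = some ' ' then 1 else 0) + srPairs cs := by
  intro cs
  induction cs with
  | nil => simp [srPairs]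
  | cons c t ih =>
    cases t with
    | nil => simp [srPairs]
    | cons d t' =>
      simp only [List.tail_cons, List.zip_cons_cons, List.map_cons, List.sum_cons,
        List.head?_cons, srPairs] at ih ⊢
      generalize hT : (List.map (fun c => if c = ' ' then (1:Int) else 0) t').sum = T at ih ⊢
      generalize hP : (List.map (fun p => if p.1 = ' ' ∧ p.2 = ' ' then (1:Int) else 0) ((d :: t').zip t')).sum = P at ih ⊢
      generalize hR : srPairs (d :: t') = R at ih ⊢
      split_ifs at ih ⊢ <;> first | omega | simp_all

-- ===== VERDICT (by name: the statement is the Claim_ definition above) =====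
theorem num_space_runs_spec : Claim_equal_num_space_runs := by
  intro s _ hpre
  unfold Spec_num_space_runs num_space_runs num_space_runs_alt
  have hne : s.toList ≠ [] := by
    intro h
    exact hpre (by rwa [← String.toList_eq_nil_iff])
  obtain ⟨c, t, hct⟩ := List.exists_cons_of_ne_nil hne
  have hslice : PySem.List.slice s.toList (some 1) none = s.toList.tail := by
    simp [PySem.List.slice_from, List.drop_one]
  rw [foldRange_eq_pairs, hslice, sums_eq_pairs]
  have hget : PySem.Str.pyGet? s 0 = s.toList.head? := by
    simp [PySem.Str.pyGet?, hct]
  rw [hget, hct]
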